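-- pv_equiv track=rewrite | github.com/pypi-data/pypi-mirror-377 | packages/simtoolsz/simtoolsz-0.1.13-py3-none-any.whl/simtoolsz/utils.py | take_from_list
-- ===== SOURCE A (Python) =====
-- from typing import List, NewType, Optional, TypeVar, Union
-- from collections.abc import Iterable
--
-- T = TypeVar('T')
--
-- def take_from_list(target: T, source: List[T]) -> Optional[T]:
--     """
--     从列表中查找并返回第一个匹配的元素。
--
--     根据 target 的类型采用不同的匹配策略：
--     - 如果是字符串，检查是否包含关系（双向）
--     - 如果是可迭代对象（如列表、元组），检查 source 中的元素是否存在于 target 中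
--     - 其他类型使用相等性比较
--
--     Args:
--         target: 要查找的目标值或可迭代对象
--         source: 要搜索的源列表
--
--     Returns:
--         找到的第一个匹配元素，如果未找到则返回 None
--
--     Examples:
--         >>> take_from_list(3, [1, 2, 3, 4])
--         3
--         >>> take_from_list([2, 3], [1, 2, 3, 4])
--         2
--         >>> take_from_list("hello", ["he", "world"])
--         "he"
--     """
--     if not source:
--         return None
--
--     # 根据 target 类型选择匹配策略
--     if isinstance(target, str):
--         # 字符串：检查双向包含关系
--         return next((item for item in source
--                     if isinstance(item, str) and (item in target or target in item)), None)
--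
--     if isinstance(target, Iterable):
--         # 可迭代对象：检查元素是否存在
--         try:
--             target_set = set(target)  # 优化查找效率
--             return next((item for item in source if item in target_set), None)
--         except TypeError:
--             # 处理不可哈希的元素
--             return next((item for item in source if item in target), None)
--
--     # 单个值：使用相等性比较
--     return next((item for item in source if item == target), None)
-- ===== SOURCE B (Python) =====
-- def take_from_list(target, source):
--     # For a non-string, non-iterable target (e.g. an int), the first element equal
--     # to target is target itself, so a membership test suffices.
--     return target if target in source else None
-- ===== Notes on version B (the rewrite author's own statement) =====
-- stated objective: simpler
-- what changed: Under the int/list[int] domain the str and Iterable branches are dead, so B replaces the emptiness guard plus generator scan for the first equal element with a single membership test returning target itself.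
import Mathlib
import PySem

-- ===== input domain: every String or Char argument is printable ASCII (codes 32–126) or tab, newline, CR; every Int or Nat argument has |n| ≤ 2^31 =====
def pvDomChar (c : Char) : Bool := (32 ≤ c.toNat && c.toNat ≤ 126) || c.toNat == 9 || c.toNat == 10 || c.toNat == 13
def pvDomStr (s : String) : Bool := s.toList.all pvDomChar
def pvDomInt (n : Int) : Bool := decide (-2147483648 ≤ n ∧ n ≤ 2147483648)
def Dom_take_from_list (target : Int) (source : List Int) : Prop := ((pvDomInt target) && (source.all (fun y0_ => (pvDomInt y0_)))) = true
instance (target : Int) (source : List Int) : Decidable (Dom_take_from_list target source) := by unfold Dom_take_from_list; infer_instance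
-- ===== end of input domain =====

-- B replaces A's emptiness guard + first-equal scan by a single membership test returning target itself (simpler; the typed Int domain makes A's str/Iterable branches dead).


-- ===== PORT A =====
-- literal port of A: early None on empty source; target is an Int, so the
-- isinstance(str)/Iterable branches never fire and the final equality scan runs.
def take_from_list (target : Int) (source : List Int) : Option Int :=
  if source = [] then none
  else source.find? (fun item => item == target)

-- ===== PORT B =====
-- port of B: membership test, returning target itself on a hit.
def take_from_list_alt (target : Int) (source : List Int) : Option Int :=
  if source.contains target then some target else none

-- ===== PRECONDITION & SPEC =====
def Spec_take_from_list (target : Int) (source : List Int) (out : Option Int) : Prop := out = take_from_list_alt target source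
instance (target : Int) (source : List Int) (out : Option Int) : Decidable (Spec_take_from_list target source out) := by unfold Spec_take_from_list; infer_instance

-- ===== CLAIM (what is proved, stated in full; the proofs are below) =====
def Claim_equal_take_from_list : Prop := ∀ (target : Int) (source : List Int), Dom_take_from_list target source → Spec_take_from_list target source (take_from_list target source)

-- ===== LEMMAS AND PROOFS =====

-- first element equal to target is target itself, iff present
theorem pv_find_eq_contains (target : Int) (source : List Int) :
    source.find? (fun item => item == target) =
      (if source.contains target then some target else none) := by
  induction source with
  | nil => simp
  | cons x xs ih =>
      by_cases hx : x = target
      · simp [hx, List.find?]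
      · have hb : (x == target) = false := by simpa using hx
        rw [List.find?, hb]; simp [ih, Ne.symm hx]

-- ===== VERDICT (by name: the statement is the Claim_ definition above) =====
theorem take_from_list_spec : Claim_equal_take_from_list := by
  intro target source _
  unfold Spec_take_from_list take_from_list take_from_list_alt
  rcases source with _ | ⟨x, xs⟩
  · simp
  · simp [pv_find_eq_contains]
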